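-- pv_equiv track=rewrite | github.com/dayo6/mpv-translate | mpv_translate/overlay.py | _redistribute_lines
-- ===== SOURCE A (Python) =====
-- def _redistribute_lines(text: str, max_lines: int) -> str:
--     """If *text* has more than *max_lines* newline-separated lines, merge
--     adjacent lines onto the same row (joined by ``  |  ``) so the total
--     number of rows does not exceed *max_lines*.
--
--     When *max_lines* is 0 or the text already fits, returns *text* unchanged.
--     """
--     if max_lines <= 0:
--         return text
--     lines = text.split("\n")
--     if len(lines) <= max_lines:
--         return text
--     # Distribute lines as evenly as possible across max_lines rows.
--     rows: list[list[str]] = [[] for _ in range(max_lines)]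
--     for i, line in enumerate(lines):
--         rows[i % max_lines].append(line)
--     return "\n".join("  |  ".join(parts) for parts in rows)
-- ===== SOURCE B (Python) =====
-- def _redistribute_lines(text: str, max_lines: int) -> str:
--     if max_lines <= 0:
--         return text
--     lines = text.split("\n")
--     if len(lines) <= max_lines:
--         return text
--     # Gather each output row directly as a strided slice of the lines.
--     rows = ["  |  ".join(lines[j::max_lines]) for j in range(max_lines)]
--     return "\n".join(rows)
-- ===== Notes on version B (the rewrite author's own statement) =====
-- stated objective: idiomatic
-- what changed: B builds each output row directly as the strided slice lines[j::max_lines] joined once, instead of A's scatter pass that allocates max_lines bucket lists and appends each line to bucket i % max_lines before joining.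
import Mathlib
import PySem

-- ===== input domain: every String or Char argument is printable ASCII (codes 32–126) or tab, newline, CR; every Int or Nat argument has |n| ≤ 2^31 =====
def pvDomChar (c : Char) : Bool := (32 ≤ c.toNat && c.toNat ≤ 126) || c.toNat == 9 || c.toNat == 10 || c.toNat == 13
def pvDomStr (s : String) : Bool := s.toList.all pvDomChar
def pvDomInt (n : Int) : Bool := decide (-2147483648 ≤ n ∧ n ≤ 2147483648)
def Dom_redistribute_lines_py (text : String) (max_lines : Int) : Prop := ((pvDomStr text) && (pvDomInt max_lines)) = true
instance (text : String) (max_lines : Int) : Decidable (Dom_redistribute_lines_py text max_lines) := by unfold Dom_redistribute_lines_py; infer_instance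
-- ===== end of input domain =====

-- B gathers each output row directly as the strided slice lines[j::max_lines] instead of A's
-- bucket-scatter by i % max_lines; same result, idiomatic decomposition (no measured speed claim).

-- ===== PORT A =====
def redistribute_lines_py (text : String) (max_lines : Int) : String :=
  if max_lines ≤ 0 then text
  else
    -- text.split("\n"): sep is the nonempty literal "\n", so split? is always `some`
    let lines := (PySem.Str.split? text "\n").getD []
    if (lines.length : Int) ≤ max_lines then text
    else
      -- rows = [[] for _ in range(max_lines)]
      let rows : List (List String) := List.replicate max_lines.toNat []
      -- for i, line in enumerate(lines): rows[i % max_lines].append(line)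
      let rows := (PySem.List.enumerate lines).foldl
        (fun rows p => rows.modify (PySem.Int.mod p.1 max_lines).toNat (fun parts => parts ++ [p.2])) rows
      PySem.Str.join "\n" (rows.map (fun parts => PySem.Str.join "  |  " parts))

-- ===== PORT B =====
-- lines[j::step] for 0 ≤ j and step ≥ 1: first element, then every step-th after it
-- (exact for nonnegative start and positive step, the only way B uses a slice)
def pvStride (step : Nat) : List String → List String
  | [] => []
  | x :: xs => x :: pvStride step (xs.drop (step - 1))
termination_by l => l.length
decreasing_by simp

def redistribute_lines_py_alt (text : String) (max_lines : Int) : String :=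
  if max_lines ≤ 0 then text
  else
    let lines := (PySem.Str.split? text "\n").getD []
    if (lines.length : Int) ≤ max_lines then text
    else
      let rows := (PySem.List.pyRange 0 max_lines 1).map
        (fun j => PySem.Str.join "  |  " (pvStride max_lines.toNat (lines.drop j.toNat)))
      PySem.Str.join "\n" rows

-- ===== PRECONDITION & SPEC =====
def Spec_redistribute_lines_py (text : String) (max_lines : Int) (out : String) : Prop := out = redistribute_lines_py_alt text max_lines
instance (text : String) (max_lines : Int) (out : String) : Decidable (Spec_redistribute_lines_py text max_lines out) := by unfold Spec_redistribute_lines_py; infer_instance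

-- ===== CLAIM (what is proved, stated in full; the proofs are below) =====
def Claim_equal_redistribute_lines_py : Prop := ∀ (text : String) (max_lines : Int), Dom_redistribute_lines_py text max_lines → Spec_redistribute_lines_py text max_lines (redistribute_lines_py text max_lines)

-- ===== LEMMAS AND PROOFS =====

theorem pvStride_nil (m : Nat) : pvStride m [] = [] := by rw [pvStride]

theorem pvStride_cons (m : Nat) (x : String) (xs : List String) :
    pvStride m (x :: xs) = x :: pvStride m (xs.drop (m - 1)) := by rw [pvStride]

-- Python's i % m on nonnegative i and positive m is plain Nat mod.
theorem pvMod_toNat (k m : Nat) : (PySem.Int.mod (k : Int) (m : Int)).toNat = k % m := by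
  simp [PySem.Int.mod, Int.fmod_eq_emod]
  omega

-- shifting by 0 < t < m changes the residue
theorem pvmod_shift (s t m : Nat) (ht : t < m) (h0 : 0 < t) : (s + t) % m ≠ s % m := by
  intro h
  have hd : m ∣ s + t - s := (Nat.modEq_iff_dvd' (Nat.le_add_right s t)).mp (Nat.ModEq.symm h)
  rw [show s + t - s = t by omega] at hd
  have := Nat.le_of_dvd h0 hd
  omega

-- A's scatter loop, read off at one index: bucket j ends up with its initial
-- content followed by the second components of the entries whose key maps to j.
theorem pvFoldl_modify_getElem? (f : Int × String → Nat) :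
    ∀ (L : List (Int × String)) (rows : List (List String)) (j : Nat),
      ((L.foldl (fun r p => r.modify (f p) (fun parts => parts ++ [p.2])) rows))[j]? =
        rows[j]?.map (fun a => a ++ (L.filter (fun p => f p == j)).map (·.2))
  | [], rows, j => by simp
  | p :: L, rows, j => by
    simp only [List.foldl_cons, List.filter_cons]
    rw [pvFoldl_modify_getElem? f L]
    by_cases h : f p = j
    · simp [h, Option.map_map, Function.comp_def, List.append_assoc]
    · simp [h]

-- The entries of enumerate(L, s) whose Python index is ≡ j (mod m) are exactly
-- the stride of the suffix starting at the next such index s + t.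
theorem pvFilter_enumerate_stride (m : Nat) (hm : 0 < m) :
    ∀ (L : List String) (s t j : Nat), t < m → (s + t) % m = j →
      ((PySem.List.enumerate L (s : Int)).filter
          (fun p => (PySem.Int.mod p.1 (m : Int)).toNat == j)).map (·.2) =
        pvStride m (L.drop t)
  | [], s, t, j, ht, hj => by simp [PySem.List.enumerate_nil, pvStride_nil]
  | x :: L, s, t, j, ht, hj => by
    rw [PySem.List.enumerate_cons, List.filter_cons]
    have hcast : ((s : Int) + 1) = ((s + 1 : Nat) : Int) := by push_cast; ring
    by_cases h0 : t = 0
    · subst h0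
      have hsel : (((PySem.Int.mod (s : Int) (m : Int)).toNat == j) = true) := by
        rw [pvMod_toNat]; simp; omega
      rw [hsel, if_pos rfl]
      simp only [List.map_cons, List.drop_zero]
      rw [pvStride_cons, hcast,
        pvFilter_enumerate_stride m hm L (s + 1) (m - 1) j (by omega)
          (by rw [show s + 1 + (m - 1) = s + m by omega, Nat.add_mod_right]; simpa using hj)]
    · have hsel : (((PySem.Int.mod (s : Int) (m : Int)).toNat == j) = false) := by
        rw [pvMod_toNat]; simp
        exact fun h => pvmod_shift s t m ht (by omega) (hj.trans h.symm)
      rw [hsel, if_neg (by simp)]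
      rw [hcast, pvFilter_enumerate_stride m hm L (s + 1) (t - 1) j (by omega)
          (by rw [show s + 1 + (t - 1) = s + t by omega]; exact hj)]
      rw [show (x :: L).drop t = L.drop (t - 1) by
        cases t with
        | zero => omega
        | succ n => simp]

-- The scattered buckets equal the strided suffixes, row by row.
theorem pvScatter_eq_stride (L : List String) (m : Nat) (hm : 0 < m) :
    (PySem.List.enumerate L).foldl
        (fun r p => r.modify (PySem.Int.mod p.1 (m : Int)).toNat (fun parts => parts ++ [p.2]))
        (List.replicate m []) =
      (List.range m).map (fun k => pvStride m (L.drop k)) := by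
  apply List.ext_getElem?
  intro j
  rw [pvFoldl_modify_getElem? (fun p => (PySem.Int.mod p.1 (m : Int)).toNat)]
  by_cases hj : j < m
  · rw [List.getElem?_replicate, if_pos hj, List.getElem?_map, List.getElem?_range hj]
    simp only [Option.map_some]
    have h0 : (PySem.List.enumerate L ((0 : Nat) : Int)) = PySem.List.enumerate L := by norm_num
    rw [← h0, pvFilter_enumerate_stride m hm L 0 j j hj (by simp [Nat.mod_eq_of_lt hj])]
    simp
  · rw [List.getElem?_replicate, if_neg hj]
    simp [Nat.le_of_not_lt hj]

-- ===== VERDICT (by name: the statement is the Claim_ definition above) =====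
theorem redistribute_lines_py_spec : Claim_equal_redistribute_lines_py := by
  intro text max_lines _
  unfold Spec_redistribute_lines_py redistribute_lines_py redistribute_lines_py_alt
  by_cases h1 : max_lines ≤ 0
  · simp [h1]
  · rw [if_neg h1, if_neg h1]
    set lines := (PySem.Str.split? text "\n").getD [] with hl
    by_cases h2 : (lines.length : Int) ≤ max_lines
    · rw [if_pos h2, if_pos h2]
    · rw [if_neg h2, if_neg h2]
      have hm : 0 < max_lines.toNat := by omega
      have hml : ((max_lines.toNat : Int)) = max_lines := Int.toNat_of_nonneg (by omega)
      dsimp only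
      rw [← hml]
      simp only [Int.toNat_natCast]
      rw [pvScatter_eq_stride lines max_lines.toNat hm]
      congr 1
      rw [PySem.List.pyRange_one]
      simp [List.map_map, Function.comp_def]
      rw [show (max max_lines 0).toNat = max_lines.toNat by omega]
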